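-- pv_equiv track=rewrite | github.com/Al3xandreD/projetMarkov | sunTzu.py | createSequenceDP
-- ===== SOURCE A (Python) =====
-- def createSequenceDP(states):
--     '''
--     Creates all sequences possible between the states
--     :param states:
--     :return:
--     '''
--     # states=[0, 1, 2]
--     l_seq=[]  # list of sequence
--
--     for state1 in states:
--         for state2 in states:
--             for state3 in states:
--                 for state4 in states:
--                     for state5 in states:
--                         X=[state1, state2, state3, state4, state5]
--                         l_seq.append(X)
--
--     return l_seq
-- ===== SOURCE B (Python) =====
-- def createSequenceDP(states):
--     '''
--     Creates all sequences possible between the states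
--     :param states:
--     :return:
--     '''
--     seqs = [[]]
--     for _ in range(5):
--         seqs = [prefix + [s] for prefix in seqs for s in states]
--     return seqs
-- ===== Notes on version B (the rewrite author's own statement) =====
-- stated objective: simpler
-- what changed: Replaces the five hard-coded nested loops with an incremental build: start from a single empty prefix and five times extend every prefix by each state, which is shorter and generalizes to any length.
import Mathlib
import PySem

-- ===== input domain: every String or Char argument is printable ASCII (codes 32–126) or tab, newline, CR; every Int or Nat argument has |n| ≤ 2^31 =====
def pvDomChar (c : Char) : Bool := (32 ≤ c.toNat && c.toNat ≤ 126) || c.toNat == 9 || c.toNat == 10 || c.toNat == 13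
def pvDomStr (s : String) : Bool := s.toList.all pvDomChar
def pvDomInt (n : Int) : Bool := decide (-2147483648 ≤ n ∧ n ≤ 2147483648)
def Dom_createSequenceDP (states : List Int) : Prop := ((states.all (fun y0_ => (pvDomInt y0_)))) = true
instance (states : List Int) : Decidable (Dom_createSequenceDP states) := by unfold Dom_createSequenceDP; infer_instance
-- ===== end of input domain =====

-- B replaces the five hard-coded nested loops by an incremental product build (simpler, length-generic); return values are identical.

-- ===== PORT A =====
def createSequenceDP (states : List Int) : List (List Int) :=
  states.foldl (fun l1 s1 =>
    states.foldl (fun l2 s2 =>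
      states.foldl (fun l3 s3 =>
        states.foldl (fun l4 s4 =>
          states.foldl (fun l5 s5 => l5 ++ [[s1, s2, s3, s4, s5]]) l4) l3) l2) l1) []

-- ===== PORT B =====
def stepSeqs (states : List Int) (seqs : List (List Int)) : List (List Int) :=
  seqs.flatMap (fun prefix_ => states.map (fun s => prefix_ ++ [s]))

def createSequenceDP_alt (states : List Int) : List (List Int) :=
  (List.range 5).foldl (fun seqs _ => stepSeqs states seqs) [[]]

-- ===== PRECONDITION & SPEC =====
def Spec_createSequenceDP (states : List Int) (out : List (List Int)) : Prop := out = createSequenceDP_alt states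
instance (states : List Int) (out : List (List Int)) : Decidable (Spec_createSequenceDP states out) := by unfold Spec_createSequenceDP; infer_instance

-- ===== CLAIM (what is proved, stated in full; the proofs are below) =====
def Claim_equal_createSequenceDP : Prop := ∀ (states : List Int), Dom_createSequenceDP states → Spec_createSequenceDP states (createSequenceDP states)

-- ===== LEMMAS AND PROOFS =====

-- closed form both ports are reduced to
def prod5 (states : List Int) : List (List Int) :=
  states.flatMap fun s1 => states.flatMap fun s2 => states.flatMap fun s3 =>
    states.flatMap fun s4 => states.map fun s5 => [s1, s2, s3, s4, s5]

theorem flatten_map_single {α β : Type} (f : α → β) (l : List α) :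
    (List.map (fun a => [f a]) l).flatten = List.map f l := by
  induction l with
  | nil => rfl
  | cons x xs ih => simp [ih]

theorem portA_eq_prod5 (states : List Int) : createSequenceDP states = prod5 states := by
  simp [createSequenceDP, prod5, List.flatMap_def, flatten_map_single]

theorem portB_eq_prod5 (states : List Int) : createSequenceDP_alt states = prod5 states := by
  simp [createSequenceDP_alt, stepSeqs, prod5, List.range_succ, List.flatMap_assoc, List.flatMap_map]

-- ===== VERDICT (by name: the statement is the Claim_ definition above) =====
theorem createSequenceDP_spec : Claim_equal_createSequenceDP := by
  intro states _
  unfold Spec_createSequenceDP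
  rw [portA_eq_prod5, portB_eq_prod5]
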